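-- pv_equiv track=rewrite | github.com/jmiba/ai-service-chatbot | mcp_servers/dbis/server.py | _find_subject_id
-- ===== SOURCE A (Python) =====
-- from typing import Any, Dict, Optional, List, Tuple
--
-- def _norm_text(v: Any) -> str:
--     try:
--         s = str(v or "").strip()
--     except Exception:
--         s = ""
--     return s
--
-- def _candidate_fields(d: dict, names: List[str]) -> Optional[str]:
--     for n in names:
--         if n in d and _norm_text(d[n]):
--             return _norm_text(d[n])
--     return None
--
-- def _find_subject_id(subjects: List[dict[str, Any]], query: str) -> Tuple[Optional[str], Optional[str]]:
--     q = _norm_text(query).lower()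
--     if not q:
--         return None, None
--
--     # Try direct ID use (numeric or exact id string)
--     for s in subjects:
--         sid = _candidate_fields(s, ["id", "subject_id", "code"]) or ""
--         if sid and (q == sid.lower()):
--             name = _candidate_fields(s, ["name", "title", "label"]) or sid
--             return sid, name
--     if q.isdigit():
--         # Assume it's a subject id
--         return q, None
--
--     # Exact name/title match (case-insensitive)
--     for s in subjects:
--         name = _candidate_fields(s, ["name", "title", "label"]) or ""
--         if name and name.lower() == q:
--             sid = _candidate_fields(s, ["id", "subject_id", "code"]) or None
--             return sid, name
--
--     # Startswith match
--     for s in subjects: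
--         name = _candidate_fields(s, ["name", "title", "label"]) or ""
--         if name and name.lower().startswith(q):
--             sid = _candidate_fields(s, ["id", "subject_id", "code"]) or None
--             return sid, name
--
--     # Contains match
--     for s in subjects:
--         name = _candidate_fields(s, ["name", "title", "label"]) or ""
--         if name and q in name.lower():
--             sid = _candidate_fields(s, ["id", "subject_id", "code"]) or None
--             return sid, name
--
--     return None, None
-- ===== SOURCE B (Python) =====
-- from typing import Any, Optional, List, Tuple
--
-- def _norm_text(v: Any) -> str:
--     try:
--         s = str(v or "").strip()
--     except Exception:
--         s = ""
--     return s
--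
-- def _candidate_fields(d: dict, names: List[str]) -> Optional[str]:
--     for n in names:
--         if n in d and _norm_text(d[n]):
--             return _norm_text(d[n])
--     return None
--
-- def _find_subject_id(subjects: List[dict], query: str) -> Tuple[Optional[str], Optional[str]]:
--     q = _norm_text(query).lower()
--     if not q:
--         return None, None
--     ex = sw = ct = None
--     # one pass: tier-1 (id match) returns immediately; record first hit of each name tier
--     for s in subjects:
--         sid = _candidate_fields(s, ["id", "subject_id", "code"])
--         name = _candidate_fields(s, ["name", "title", "label"])
--         if sid is not None and q == sid.lower():
--             return sid, (name if name is not None else sid)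
--         if name is not None:
--             ln = name.lower()
--             if ex is None and ln == q:
--                 ex = (sid, name)
--             if sw is None and ln.startswith(q):
--                 sw = (sid, name)
--             if ct is None and q in ln:
--                 ct = (sid, name)
--     if q.isdigit():
--         return q, None
--     for cand in (ex, sw, ct):
--         if cand is not None:
--             return cand
--     return None, None
-- ===== Notes on version B (the rewrite author's own statement) =====
-- stated objective: alternative
-- what changed: Replaces A's four sequential scans over subjects (id-match, exact, startswith, contains) by a single pass that returns on an id match and records the first candidate of each name tier, resolving tiers after the loop.
import Mathlib
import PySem

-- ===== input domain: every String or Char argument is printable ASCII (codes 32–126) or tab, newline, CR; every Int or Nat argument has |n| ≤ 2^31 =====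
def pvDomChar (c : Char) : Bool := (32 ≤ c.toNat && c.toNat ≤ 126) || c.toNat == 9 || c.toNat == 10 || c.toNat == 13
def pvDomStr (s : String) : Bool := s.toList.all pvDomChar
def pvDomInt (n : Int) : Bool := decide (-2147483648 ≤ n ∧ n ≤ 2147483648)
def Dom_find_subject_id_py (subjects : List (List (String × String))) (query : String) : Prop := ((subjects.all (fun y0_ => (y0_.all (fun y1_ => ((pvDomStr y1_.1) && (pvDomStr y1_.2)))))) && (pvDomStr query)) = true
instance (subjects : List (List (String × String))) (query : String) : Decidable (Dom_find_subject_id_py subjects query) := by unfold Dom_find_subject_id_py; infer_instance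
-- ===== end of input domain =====

-- B folds A's four sequential scans into one pass recording the first candidate of each name tier (objective: alternative decomposition, same cost).

-- ===== PORT A =====

-- _norm_text: values are strings, so str(v or "").strip() = v.strip()
def pvNorm (v : String) : String := PySem.Str.strip v

-- _candidate_fields
def pvCand (d : List (String × String)) (names : List String) : Option String :=
  match names with
  | [] => none
  | n :: rest =>
    match (PySem.Dict.mk d).get? n with
    | some v => if pvNorm v ≠ "" then some (pvNorm v) else pvCand d rest
    | none => pvCand d rest

def pvIdNames : List String := ["id", "subject_id", "code"]
def pvNameNames : List String := ["name", "title", "label"]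

-- A's first loop: direct id match (early return encoded as Option)
def pvA_loop1 (q : String) : List (List (String × String)) → Option (Option String × Option String)
  | [] => none
  | s :: rest =>
    let sid := (pvCand s pvIdNames).getD ""
    if sid ≠ "" ∧ q = PySem.Str.lower sid then
      some (some sid, some ((pvCand s pvNameNames).getD sid))
    else pvA_loop1 q rest

-- A's exact-name loop
def pvA_loop2 (q : String) : List (List (String × String)) → Option (Option String × String)
  | [] => none
  | s :: rest =>
    let name := (pvCand s pvNameNames).getD ""
    if name ≠ "" ∧ PySem.Str.lower name = q then
      some (pvCand s pvIdNames, name)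
    else pvA_loop2 q rest

-- A's startswith loop
def pvA_loop3 (q : String) : List (List (String × String)) → Option (Option String × String)
  | [] => none
  | s :: rest =>
    let name := (pvCand s pvNameNames).getD ""
    if name ≠ "" ∧ PySem.Str.startswith (PySem.Str.lower name) q then
      some (pvCand s pvIdNames, name)
    else pvA_loop3 q rest

-- A's contains loop
def pvA_loop4 (q : String) : List (List (String × String)) → Option (Option String × String)
  | [] => none
  | s :: rest =>
    let name := (pvCand s pvNameNames).getD ""
    if name ≠ "" ∧ PySem.Str.isIn q (PySem.Str.lower name) then
      some (pvCand s pvIdNames, name)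
    else pvA_loop4 q rest

def find_subject_id_py (subjects : List (List (String × String))) (query : String) : Option String × Option String :=
  let q := PySem.Str.lower (pvNorm query)
  if q = "" then (none, none)
  else
    match pvA_loop1 q subjects with
    | some r => r
    | none =>
      if PySem.Str.strIsdigit q then (some q, none)
      else
        match pvA_loop2 q subjects with
        | some (sid, name) => (sid, some name)
        | none =>
          match pvA_loop3 q subjects with
          | some (sid, name) => (sid, some name)
          | none =>
            match pvA_loop4 q subjects with
            | some (sid, name) => (sid, some name)
            | none => (none, none)

-- ===== PORT B =====

-- candidate recorded for one subject at one name tier (test sees the lowered name)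
def pvTier (test : String → Bool) (sid? name? : Option String) : Option (Option String × String) :=
  match name? with
  | some name => if test (PySem.Str.lower name) then some (sid?, name) else none
  | none => none

-- the post-loop resolution: digit fallback, then the recorded tiers in order
def pvB_fin (q : String) (ex sw ct : Option (Option String × String)) : Option String × Option String :=
  if PySem.Str.strIsdigit q then (some q, none)
  else
    match ex with
    | some (sid, name) => (sid, some name)
    | none =>
      match sw with
      | some (sid, name) => (sid, some name)
      | none =>
        match ct with
        | some (sid, name) => (sid, some name)
        | none => (none, none)

-- B's single pass
def pvB_loop (q : String) (subjects : List (List (String × String)))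
    (ex sw ct : Option (Option String × String)) : Option String × Option String :=
  match subjects with
  | [] => pvB_fin q ex sw ct
  | s :: rest =>
    let sid? := pvCand s pvIdNames
    let name? := pvCand s pvNameNames
    match sid? with
    | some sid =>
      if q = PySem.Str.lower sid then (some sid, some (name?.getD sid))
      else
        pvB_loop q rest (ex.or (pvTier (· = q) sid? name?))
          (sw.or (pvTier (fun ln => PySem.Str.startswith ln q) sid? name?))
          (ct.or (pvTier (fun ln => PySem.Str.isIn q ln) sid? name?))
    | none =>
      pvB_loop q rest (ex.or (pvTier (· = q) sid? name?))
        (sw.or (pvTier (fun ln => PySem.Str.startswith ln q) sid? name?))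
        (ct.or (pvTier (fun ln => PySem.Str.isIn q ln) sid? name?))

def find_subject_id_py_alt (subjects : List (List (String × String))) (query : String) : Option String × Option String :=
  let q := PySem.Str.lower (pvNorm query)
  if q = "" then (none, none)
  else pvB_loop q subjects none none none

-- ===== PRECONDITION & SPEC =====
def Spec_find_subject_id_py (subjects : List (List (String × String))) (query : String) (out : Option String × Option String) : Prop := out = find_subject_id_py_alt subjects query
instance (subjects : List (List (String × String))) (query : String) (out : Option String × Option String) : Decidable (Spec_find_subject_id_py subjects query out) := by unfold Spec_find_subject_id_py; infer_instance

-- ===== CLAIM (what is proved, stated in full; the proofs are below) =====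
def Claim_equal_find_subject_id_py : Prop := ∀ (subjects : List (List (String × String))) (query : String), Dom_find_subject_id_py subjects query → Spec_find_subject_id_py subjects query (find_subject_id_py subjects query)

-- ===== LEMMAS AND PROOFS =====

-- _candidate_fields never returns an empty string
theorem pvCand_ne_empty (d : List (String × String)) (names : List String) (x : String)
    (h : pvCand d names = some x) : x ≠ "" := by
  induction names with
  | nil => simp [pvCand] at h
  | cons n rest ih =>
    simp only [pvCand] at h
    cases hg : (PySem.Dict.mk d).get? n with
    | none => rw [hg] at h; exact ih h
    | some v =>
      rw [hg] at h
      by_cases hv : pvNorm v ≠ ""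
      · simp [hv] at h; subst h; exact hv
      · simp [hv] at h; exact ih h

-- A's name-tier loops peel one subject off as a pvTier candidate
theorem pvA_loop2_cons (q : String) (s : List (String × String)) (rest : List (List (String × String))) :
    pvA_loop2 q (s :: rest) = (pvTier (· = q) (pvCand s pvIdNames) (pvCand s pvNameNames)).or (pvA_loop2 q rest) := by
  simp only [pvA_loop2, pvTier]
  cases hn : pvCand s pvNameNames with
  | none => simp
  | some name =>
    have hne := pvCand_ne_empty _ _ _ hn
    by_cases ht : PySem.Str.lower name = q <;> simp [hne, ht]

theorem pvA_loop3_cons (q : String) (s : List (String × String)) (rest : List (List (String × String))) :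
    pvA_loop3 q (s :: rest) = (pvTier (fun ln => PySem.Str.startswith ln q) (pvCand s pvIdNames) (pvCand s pvNameNames)).or (pvA_loop3 q rest) := by
  simp only [pvA_loop3, pvTier]
  cases hn : pvCand s pvNameNames with
  | none => simp
  | some name =>
    have hne := pvCand_ne_empty _ _ _ hn
    simp only [Option.getD_some]
    by_cases ht : PySem.Str.startswith (PySem.Str.lower name) q = true
    · rw [if_pos ⟨hne, ht⟩, if_pos ht, Option.some_or]
    · rw [if_neg (fun h => ht h.2), if_neg ht, Option.none_or]

theorem pvA_loop4_cons (q : String) (s : List (String × String)) (rest : List (List (String × String))) :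
    pvA_loop4 q (s :: rest) = (pvTier (fun ln => PySem.Str.isIn q ln) (pvCand s pvIdNames) (pvCand s pvNameNames)).or (pvA_loop4 q rest) := by
  simp only [pvA_loop4, pvTier]
  cases hn : pvCand s pvNameNames with
  | none => simp
  | some name =>
    have hne := pvCand_ne_empty _ _ _ hn
    simp only [Option.getD_some]
    by_cases ht : PySem.Str.isIn q (PySem.Str.lower name) = true
    · rw [if_pos ⟨hne, ht⟩, if_pos ht, Option.some_or]
    · rw [if_neg (fun h => ht h.2), if_neg ht, Option.none_or]

-- the loop invariant: B's single pass equals A's loop1 result, else the post-loop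
-- resolution applied to the accumulators completed with A's three name-tier loops
theorem pvB_loop_eq (q : String) (subjects : List (List (String × String)))
    (ex sw ct : Option (Option String × String)) :
    pvB_loop q subjects ex sw ct =
      match pvA_loop1 q subjects with
      | some r => r
      | none => pvB_fin q (ex.or (pvA_loop2 q subjects)) (sw.or (pvA_loop3 q subjects)) (ct.or (pvA_loop4 q subjects)) := by
  induction subjects generalizing ex sw ct with
  | nil => simp [pvB_loop, pvA_loop1, pvA_loop2, pvA_loop3, pvA_loop4]
  | cons s rest ih =>
    rw [pvA_loop2_cons, pvA_loop3_cons, pvA_loop4_cons]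
    simp only [pvB_loop]
    cases hs : pvCand s pvIdNames with
    | some sid =>
      have hsid := pvCand_ne_empty _ _ _ hs
      by_cases hq : q = PySem.Str.lower sid
      · simp only [hq, if_pos rfl]
        simp [pvA_loop1, hs, hsid, hq]
      · simp only [if_neg hq]
        rw [ih]
        have h1 : pvA_loop1 q (s :: rest) = pvA_loop1 q rest := by
          simp [pvA_loop1, hs, hsid, hq]
        rw [h1, Option.or_assoc, Option.or_assoc, Option.or_assoc]
    | none =>
      rw [ih]
      have h1 : pvA_loop1 q (s :: rest) = pvA_loop1 q rest := by
        simp [pvA_loop1, hs]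
      rw [h1, Option.or_assoc, Option.or_assoc, Option.or_assoc]

-- ===== VERDICT (by name: the statement is the Claim_ definition above) =====
theorem find_subject_id_py_spec : Claim_equal_find_subject_id_py := by
  intro subjects query _
  unfold Spec_find_subject_id_py find_subject_id_py find_subject_id_py_alt
  by_cases hq : PySem.Str.lower (pvNorm query) = ""
  · simp [hq]
  · simp only [hq, if_neg hq]
    rw [pvB_loop_eq]
    cases pvA_loop1 (PySem.Str.lower (pvNorm query)) subjects with
    | some r => rfl
    | none => simp [pvB_fin]
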